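-- pv_equiv track=rewrite | github.com/ThereseColeongco/portfolio | plates.py | not_nil
-- ===== SOURCE A (Python) =====
-- def not_nil(s):
--     index_list = []
--     num = "0123456789"
--     for number in num:
--         if number in s:
--              index_list.append(s.index(number)) # will print all indexes of every number in plate
--
--     if index_list and str(s[min(index_list)]) == "0":
--         return False
--     else:
--         return True
-- ===== SOURCE B (Python) =====
-- def not_nil(s):
--     for ch in s:
--         if ch in "0123456789":
--             return ch != "0"
--     return True
-- ===== Notes on version B (the rewrite author's own statement) =====
-- stated objective: simpler
-- what changed: Replaces A's per-digit table of first indices plus min with a single left-to-right scan that stops at the first digit character and tests whether that digit is zero.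
import Mathlib
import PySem

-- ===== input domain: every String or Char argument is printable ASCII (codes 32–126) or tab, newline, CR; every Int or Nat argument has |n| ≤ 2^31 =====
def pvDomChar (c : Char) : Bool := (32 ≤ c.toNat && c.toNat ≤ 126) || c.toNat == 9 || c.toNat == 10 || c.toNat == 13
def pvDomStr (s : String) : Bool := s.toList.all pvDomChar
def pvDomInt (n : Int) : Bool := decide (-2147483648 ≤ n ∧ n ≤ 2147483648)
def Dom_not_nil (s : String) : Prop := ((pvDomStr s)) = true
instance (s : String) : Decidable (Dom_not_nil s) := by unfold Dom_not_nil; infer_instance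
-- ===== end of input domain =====

-- B replaces A's per-digit table of first indices + min with one forward scan stopping at the
-- first digit character (objective: simpler).

-- ===== PORT A =====
-- the list of s.index(number) for every digit 'number' occurring in s
def pvIndexList (l : List Char) : List Int :=
  "0123456789".toList.foldl
    (fun acc c => if PySem.Chars.isIn [c] l then acc ++ [PySem.Chars.find l [c]] else acc) []

def not_nil (s : String) : Bool :=
  -- 'if index_list and s[min(index_list)] == "0"': an empty list is falsy, and min? = none exactly there
  match PySem.List.min? (pvIndexList s.toList) (fun x => x) with
  | some m => if PySem.Chars.pyGet? s.toList m == some '0' then false else true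
  | none => true

-- ===== PORT B =====
-- 'for ch in s: if ch in "0123456789": return ch != "0"' / 'return True'
def pvScan : List Char → Bool
  | [] => true
  | c :: t => if PySem.Chars.isIn [c] "0123456789".toList then c != '0' else pvScan t

def not_nil_alt (s : String) : Bool := pvScan s.toList

-- ===== PRECONDITION & SPEC =====
def Spec_not_nil (s : String) (out : Bool) : Prop := out = not_nil_alt s
instance (s : String) (out : Bool) : Decidable (Spec_not_nil s out) := by unfold Spec_not_nil; infer_instance

-- ===== CLAIM (what is proved, stated in full; the proofs are below) =====
def Claim_equal_not_nil : Prop := ∀ (s : String), Dom_not_nil s → Spec_not_nil s (not_nil s)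

-- ===== LEMMAS AND PROOFS =====

theorem pv_isIn_singleton_iff (c : Char) (l : List Char) :
    PySem.Chars.isIn [c] l = true ↔ c ∈ l := by
  rw [PySem.Chars.isIn_iff_infix]
  constructor
  · rintro ⟨pre, suf, rfl⟩; simp
  · intro h
    obtain ⟨pre, suf, rfl⟩ := List.append_of_mem h
    exact ⟨pre, suf, by simp⟩

theorem pv_prefix_singleton (c : Char) (xs : List Char) :
    [c] <+: xs ↔ xs.head? = some c := by
  cases xs with
  | nil => simp
  | cons a t =>
    constructor
    · rintro ⟨u, hu⟩
      simp only [List.cons_append, List.nil_append, List.cons.injEq] at hu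
      simp [hu.1]
    · intro h
      simp only [List.head?_cons, Option.some.injEq] at h
      exact ⟨t, by simp [h]⟩

theorem pv_prefix_singleton_drop (c : Char) (l : List Char) (j : Nat) :
    [c] <+: l.drop j ↔ l[j]? = some c := by
  rw [pv_prefix_singleton, List.head?_drop]

-- find of a single character is characterised by first occurrence
theorem pv_find_singleton_eq (c : Char) (l : List Char) (k : Nat)
    (hk : l[k]? = some c) (hmin : ∀ j < k, l[j]? ≠ some c) :
    PySem.Chars.find l [c] = (k : Int) := by
  have hmem : c ∈ l := List.mem_of_getElem? hk
  have hnn : 0 ≤ PySem.Chars.find l [c] := by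
    rw [PySem.Chars.find_nonneg_iff]
    obtain ⟨pre, suf, rfl⟩ := List.append_of_mem hmem
    exact ⟨pre, suf, by simp⟩
  obtain ⟨hpre, hm⟩ := PySem.Chars.find_spec hnn
  rw [pv_prefix_singleton_drop] at hpre
  have : (PySem.Chars.find l [c]).toNat = k := by
    rcases Nat.lt_trichotomy (PySem.Chars.find l [c]).toNat k with h | h | h
    · exact absurd hpre (hmin _ h)
    · exact h
    · exact absurd ((pv_prefix_singleton_drop c l k).mpr hk) (hm _ h)
  omega

theorem pv_find_nonneg_of_mem (c : Char) (l : List Char) (h : c ∈ l) :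
    0 ≤ PySem.Chars.find l [c] := by
  rw [PySem.Chars.find_nonneg_iff]
  obtain ⟨pre, suf, rfl⟩ := List.append_of_mem h
  exact ⟨pre, suf, by simp⟩

theorem pv_find_cons_of_ne (a c : Char) (t : List Char) (hne : a ≠ c) (hc : c ∈ t) :
    PySem.Chars.find (a :: t) [c] = PySem.Chars.find t [c] + 1 := by
  have hnn := pv_find_nonneg_of_mem c t hc
  obtain ⟨hpre, hm⟩ := PySem.Chars.find_spec hnn
  rw [pv_prefix_singleton_drop] at hpre
  have key := pv_find_singleton_eq c (a :: t) ((PySem.Chars.find t [c]).toNat + 1)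
    (by simpa using hpre)
    (by
      intro j hj
      cases j with
      | zero => simp [hne]
      | succ i =>
        have hi : i < (PySem.Chars.find t [c]).toNat := by omega
        have := hm i hi
        rw [pv_prefix_singleton_drop] at this
        simpa using this)
  rw [key, Nat.cast_add, Nat.cast_one, Int.toNat_of_nonneg hnn]

-- value-level characterisation of min? with the identity key
theorem pv_min?_id_eq (xs : List Int) (m : Int) (hmem : m ∈ xs) (hmin : ∀ y ∈ xs, m ≤ y) :
    PySem.List.min? xs (fun x => x) = some m := by
  cases h : PySem.List.min? xs (fun x => x) with
  | none =>
    rw [PySem.List.min?_eq_none_iff] at h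
    simp [h] at hmem
  | some m' =>
    have h1 := PySem.List.min?_mem h
    have h2 := PySem.List.min?_isMin h m hmem
    have h3 := hmin m' h1
    simp only at h2
    exact congrArg some (le_antisymm h2 h3)

theorem pv_min?_map_add_one (xs : List Int) :
    PySem.List.min? (xs.map (· + 1)) (fun x => x) =
      (PySem.List.min? xs (fun x => x)).map (· + 1) := by
  cases h : PySem.List.min? xs (fun x => x) with
  | none =>
    rw [PySem.List.min?_eq_none_iff] at h
    simp [h, PySem.List.min?_eq_none_iff]
  | some m =>
    have h1 := PySem.List.min?_mem h
    have h2 := PySem.List.min?_isMin h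
    simp only [Option.map_some]
    apply pv_min?_id_eq
    · exact List.mem_map_of_mem h1
    · intro y hy
      obtain ⟨x, hx, rfl⟩ := List.mem_map.mp hy
      have := h2 x hx
      simp at this
      omega

-- the index lists of a :: t and t when a is not a digit
theorem pv_indexList_cons_of_not_digit (a : Char) (t : List Char)
    (ha : a ∉ "0123456789".toList) :
    pvIndexList (a :: t) = (pvIndexList t).map (· + 1) := by
  unfold pvIndexList
  rw [PySem.List.foldl_append_if, PySem.List.foldl_append_if]
  simp only [List.nil_append, List.map_map]
  rw [List.filter_congr (q := fun c => PySem.Chars.isIn [c] t)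
    (by
      intro c hc
      have hne : c ≠ a := fun h => ha (h ▸ hc)
      have h1 : (PySem.Chars.isIn [c] (a :: t)) = (PySem.Chars.isIn [c] t) := by
        rcases h2 : PySem.Chars.isIn [c] t with _ | _
        · rcases h3 : PySem.Chars.isIn [c] (a :: t) with _ | _
          · rfl
          · have := (pv_isIn_singleton_iff c (a :: t)).mp h3
            rcases List.mem_cons.mp this with h | h
            · exact absurd h hne
            · rw [← h2, (pv_isIn_singleton_iff c t).mpr h]
        · have := (pv_isIn_singleton_iff c t).mp h2
          exact (pv_isIn_singleton_iff c (a :: t)).mpr (List.mem_cons_of_mem a this)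
      simp [h1])]
  apply List.map_congr_left
  intro c hc
  rw [List.mem_filter, pv_isIn_singleton_iff] at hc
  have hne : a ≠ c := fun h => ha (h ▸ hc.1)
  exact pv_find_cons_of_ne a c t hne hc.2

theorem pv_main (l : List Char) :
    (match PySem.List.min? (pvIndexList l) (fun x => x) with
      | some m => if PySem.Chars.pyGet? l m == some '0' then false else true
      | none => true) = pvScan l := by
  induction l with
  | nil => decide
  | cons a t ih =>
    by_cases ha : a ∈ "0123456789".toList
    · -- first character is a digit: min is 0 and s[0] = a
      have h0 : PySem.Chars.find (a :: t) [a] = (0 : Int) :=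
        pv_find_singleton_eq a (a :: t) 0 (by simp) (by omega)
      have hmem0 : (0 : Int) ∈ pvIndexList (a :: t) := by
        unfold pvIndexList
        rw [PySem.List.foldl_append_if]
        simp only [List.nil_append]
        rw [← h0]
        exact List.mem_map_of_mem (List.mem_filter.mpr ⟨ha, (pv_isIn_singleton_iff a _).mpr (by simp)⟩)
      have hnn : ∀ y ∈ pvIndexList (a :: t), (0 : Int) ≤ y := by
        intro y hy
        unfold pvIndexList at hy
        rw [PySem.List.foldl_append_if] at hy
        simp only [List.nil_append] at hy
        obtain ⟨c, hc, rfl⟩ := List.mem_map.mp hy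
        rw [List.mem_filter, pv_isIn_singleton_iff] at hc
        exact pv_find_nonneg_of_mem c _ hc.2
      rw [pv_min?_id_eq _ 0 hmem0 hnn]
      have hget : PySem.Chars.pyGet? (a :: t) 0 = some a := by
        simp [PySem.Chars.pyGet?_eq_listPyGet?, PySem.List.pyGet?, PySem.List.pyIdx?]
      have hsc : PySem.Chars.isIn [a] ['0','1','2','3','4','5','6','7','8','9'] = true :=
        (pv_isIn_singleton_iff a _).mpr (by simpa using ha)
      rw [show pvScan (a :: t) = (a != '0') by simp [pvScan, hsc]]
      simp only [hget]
      by_cases h0' : a = '0' <;> simp [h0']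
    · -- first character is not a digit: both sides recurse into t
      rw [pv_indexList_cons_of_not_digit a t ha, pv_min?_map_add_one]
      have hsc : PySem.Chars.isIn [a] ['0','1','2','3','4','5','6','7','8','9'] = false := by
        rcases h : PySem.Chars.isIn [a] ['0','1','2','3','4','5','6','7','8','9'] with _ | _
        · rfl
        · exact absurd ((pv_isIn_singleton_iff a _).mp h) (by simpa using ha)
      rw [show pvScan (a :: t) = pvScan t by simp [pvScan, hsc]]
      rw [← ih]
      cases hmt : PySem.List.min? (pvIndexList t) (fun x => x) with
      | none => simp
      | some m =>
        have h1 := PySem.List.min?_mem hmt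
        have hnnm : 0 ≤ m := by
          unfold pvIndexList at h1
          rw [PySem.List.foldl_append_if] at h1
          simp only [List.nil_append] at h1
          obtain ⟨c, hc, rfl⟩ := List.mem_map.mp h1
          rw [List.mem_filter, pv_isIn_singleton_iff] at hc
          exact pv_find_nonneg_of_mem c _ hc.2
        simp only [Option.map_some]
        have hsh : PySem.Chars.pyGet? (a :: t) (m + 1) = PySem.Chars.pyGet? t m := by
          simp only [PySem.Chars.pyGet?_eq_listPyGet?]
          obtain ⟨n, rfl⟩ := Int.eq_ofNat_of_zero_le hnnm
          rw [show ((n : Int) + 1) = ((n + 1 : Nat) : Int) by omega]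
          simp [PySem.List.pyGet?_natCast]
        rw [hsh]

-- ===== VERDICT (by name: the statement is the Claim_ definition above) =====
theorem not_nil_spec : Claim_equal_not_nil := by
  intro s _
  unfold Spec_not_nil not_nil not_nil_alt
  exact pv_main s.toList
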